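-- pv_equiv track=rewrite | github.com/techSaswata/Transactions_Analytics-Demo | app.py | _pick_metric_column
-- ===== SOURCE A (Python) =====
-- def _pick_metric_column(numeric_cols):
--     """
--     Choose a "best" metric column from a list of numeric column names.
--     Preference is given to rate/percentage-style metrics, then counts, then
--     generic numeric fields.
--     """
--     preferred_order = [
--         "success_rate_percentage",
--         "failed_rate_percentage",
--         "flagged_percentage",
--         "flagged_rate",
--         "failure_rate",
--         "failed_transactions",
--         "successful_transactions",
--         "total_transactions",
--         "amount_inr",
--     ]
--     for name in preferred_order:
--         if name in numeric_cols:
--             return name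
--     return numeric_cols[0] if numeric_cols else None
-- ===== SOURCE B (Python) =====
-- def _pick_metric_column(numeric_cols):
--     """
--     Choose a "best" metric column from a list of numeric column names.
--     Single pass over numeric_cols, consulting a rank table built from the
--     preference list; ties (equal rank) keep the first-encountered column.
--     """
--     preferred_order = [
--         "success_rate_percentage",
--         "failed_rate_percentage",
--         "flagged_percentage",
--         "flagged_rate",
--         "failure_rate",
--         "failed_transactions",
--         "successful_transactions",
--         "total_transactions",
--         "amount_inr",
--     ]
--     if not numeric_cols:
--         return None
--     rank = {name: i for i, name in enumerate(preferred_order)}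
--     big = len(preferred_order)
--     best = numeric_cols[0]
--     best_r = rank.get(best, big)
--     for col in numeric_cols[1:]:
--         r = rank.get(col, big)
--         if r < best_r:
--             best, best_r = col, r
--     return best
-- ===== Notes on version B (the rewrite author's own statement) =====
-- stated objective: alternative
-- what changed: Inverts the traversal: instead of scanning the fixed preference list and testing membership in numeric_cols for each name, B builds a rank dictionary from the preference list once and makes a single min-rank pass over numeric_cols (ties keep the first element), so the per-column work is one hash lookup instead of a list scan.
import Mathlib
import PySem

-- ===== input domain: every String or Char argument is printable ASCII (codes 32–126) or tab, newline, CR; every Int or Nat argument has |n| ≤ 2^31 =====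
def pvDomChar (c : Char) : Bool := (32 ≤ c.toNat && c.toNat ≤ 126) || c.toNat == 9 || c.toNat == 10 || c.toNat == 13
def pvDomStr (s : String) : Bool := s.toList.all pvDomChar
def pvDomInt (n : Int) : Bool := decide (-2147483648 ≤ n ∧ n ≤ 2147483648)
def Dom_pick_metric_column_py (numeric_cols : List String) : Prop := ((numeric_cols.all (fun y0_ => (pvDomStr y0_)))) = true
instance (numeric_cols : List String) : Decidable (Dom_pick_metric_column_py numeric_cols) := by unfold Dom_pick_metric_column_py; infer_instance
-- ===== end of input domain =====

-- B replaces A's scan of the fixed preference list (membership test per name) by a single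
-- min-rank pass over numeric_cols consulting a rank dictionary built once; same return value.

-- ===== PORT A =====
def pvPreferredOrder : List String :=
  ["success_rate_percentage", "failed_rate_percentage", "flagged_percentage",
   "flagged_rate", "failure_rate", "failed_transactions",
   "successful_transactions", "total_transactions", "amount_inr"]

def pvPickLoop : List String → List String → Option String
  | [], _ => none
  | name :: rest, cols => if cols.contains name then some name else pvPickLoop rest cols

def pick_metric_column_py (numeric_cols : List String) : Option String :=
  match pvPickLoop pvPreferredOrder numeric_cols with
  | some n => some n
  | none => match numeric_cols with
            | [] => none
            | c :: _ => some c

-- ===== PORT B =====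
def pvAltPreferred : List String :=
  ["success_rate_percentage", "failed_rate_percentage", "flagged_percentage",
   "flagged_rate", "failure_rate", "failed_transactions",
   "successful_transactions", "total_transactions", "amount_inr"]

def pvAltRank : PySem.Dict String Int :=
  (PySem.List.enumerate pvAltPreferred 0).foldl (fun d p => d.insert p.2 p.1) PySem.Dict.empty

def pvAltBig : Int := (pvAltPreferred.length : Int)

def pvAltStep (st : String × Int) (col : String) : String × Int :=
  let r := pvAltRank.getD col pvAltBig
  if r < st.2 then (col, r) else st

def pick_metric_column_py_alt (numeric_cols : List String) : Option String :=
  match numeric_cols with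
  | [] => none
  | c :: rest => some ((rest.foldl pvAltStep (c, pvAltRank.getD c pvAltBig)).1)


-- ===== PRECONDITION & SPEC =====
def Spec_pick_metric_column_py (numeric_cols : List String) (out : Option String) : Prop := out = pick_metric_column_py_alt numeric_cols
instance (numeric_cols : List String) (out : Option String) : Decidable (Spec_pick_metric_column_py numeric_cols out) := by unfold Spec_pick_metric_column_py; infer_instance

-- ===== CLAIM (what is proved, stated in full; the proofs are below) =====
def Claim_equal_pick_metric_column_py : Prop := ∀ (numeric_cols : List String), Dom_pick_metric_column_py numeric_cols → Spec_pick_metric_column_py numeric_cols (pick_metric_column_py numeric_cols)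

-- ===== LEMMAS AND PROOFS =====
def pvR (s : String) : Int := pvAltRank.getD s pvAltBig

lemma pvR_eq (s : String) : pvR s =
    if s = "success_rate_percentage" then 0
    else if s = "failed_rate_percentage" then 1
    else if s = "flagged_percentage" then 2
    else if s = "flagged_rate" then 3
    else if s = "failure_rate" then 4
    else if s = "failed_transactions" then 5
    else if s = "successful_transactions" then 6
    else if s = "total_transactions" then 7
    else if s = "amount_inr" then 8
    else 9 := by
  have h : pvAltRank = PySem.Dict.mk
      [("success_rate_percentage", 0), ("failed_rate_percentage", 1), ("flagged_percentage", 2),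
       ("flagged_rate", 3), ("failure_rate", 4), ("failed_transactions", 5),
       ("successful_transactions", 6), ("total_transactions", 7), ("amount_inr", 8)] := by decide
  simp only [pvR, h, pvAltBig, pvAltPreferred, PySem.Dict.getD, PySem.Dict.get?]
  split_ifs with h1 h2 h3 h4 h5 h6 h7 h8 h9
  · subst h1; decide
  · subst h2; decide
  · subst h3; decide
  · subst h4; decide
  · subst h5; decide
  · subst h6; decide
  · subst h7; decide
  · subst h8; decide
  · subst h9; decide
  · have e1 : (("success_rate_percentage" : String) == s) = false := beq_eq_false_iff_ne.mpr (fun e => h1 e.symm)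
    have e2 : (("failed_rate_percentage" : String) == s) = false := beq_eq_false_iff_ne.mpr (fun e => h2 e.symm)
    have e3 : (("flagged_percentage" : String) == s) = false := beq_eq_false_iff_ne.mpr (fun e => h3 e.symm)
    have e4 : (("flagged_rate" : String) == s) = false := beq_eq_false_iff_ne.mpr (fun e => h4 e.symm)
    have e5 : (("failure_rate" : String) == s) = false := beq_eq_false_iff_ne.mpr (fun e => h5 e.symm)
    have e6 : (("failed_transactions" : String) == s) = false := beq_eq_false_iff_ne.mpr (fun e => h6 e.symm)
    have e7 : (("successful_transactions" : String) == s) = false := beq_eq_false_iff_ne.mpr (fun e => h7 e.symm)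
    have e8 : (("total_transactions" : String) == s) = false := beq_eq_false_iff_ne.mpr (fun e => h8 e.symm)
    have e9 : (("amount_inr" : String) == s) = false := beq_eq_false_iff_ne.mpr (fun e => h9 e.symm)
    simp [e1, e2, e3, e4, e5, e6, e7, e8, e9]

lemma pvAltStep_eq (st : String × Int) (col : String) :
    pvAltStep st col = if pvR col < st.2 then (col, pvR col) else st := rfl

lemma pv_fold_props (xs : List String) : ∀ (b : String),
    (xs.foldl pvAltStep (b, pvR b)).2 = pvR (xs.foldl pvAltStep (b, pvR b)).1 ∧
    ((xs.foldl pvAltStep (b, pvR b)).1 = b ∨ (xs.foldl pvAltStep (b, pvR b)).1 ∈ xs) ∧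
    pvR (xs.foldl pvAltStep (b, pvR b)).1 ≤ pvR b ∧
    ∀ x ∈ xs, pvR (xs.foldl pvAltStep (b, pvR b)).1 ≤ pvR x := by
  induction xs with
  | nil => intro b; simp
  | cons x xs ih =>
    intro b
    by_cases h : pvR x < pvR b
    · have hs : (x :: xs).foldl pvAltStep (b, pvR b) = xs.foldl pvAltStep (x, pvR x) := by
        simp [List.foldl_cons, pvAltStep_eq, h]
      obtain ⟨h1, h2, h3, h4⟩ := ih x
      rw [hs]
      refine ⟨h1, ?_, by omega, ?_⟩
      · rcases h2 with h2 | h2 <;> simp [h2]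
      · intro y hy
        rcases List.mem_cons.mp hy with rfl | hy
        · exact h3
        · exact h4 y hy
    · have hs : (x :: xs).foldl pvAltStep (b, pvR b) = xs.foldl pvAltStep (b, pvR b) := by
        simp [List.foldl_cons, pvAltStep_eq, h]
      obtain ⟨h1, h2, h3, h4⟩ := ih b
      rw [hs]
      refine ⟨h1, ?_, h3, ?_⟩
      · rcases h2 with h2 | h2 <;> simp [h2]
      · intro y hy
        rcases List.mem_cons.mp hy with rfl | hy
        · omega
        · exact h4 y hy

lemma pv_fold_stay (xs : List String) : ∀ (b : String),
    (∀ x ∈ xs, ¬ pvR x < pvR b) → xs.foldl pvAltStep (b, pvR b) = (b, pvR b) := by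
  induction xs with
  | nil => intro b _; rfl
  | cons x xs ih =>
    intro b h
    have hx : ¬ pvR x < pvR b := h x (by simp)
    have hs : (x :: xs).foldl pvAltStep (b, pvR b) = xs.foldl pvAltStep (b, pvR b) := by
      simp [List.foldl_cons, pvAltStep_eq, hx]
    rw [hs]
    exact ih b (fun y hy => h y (by simp [hy]))

lemma pv_alt_of_min (cols : List String) (n : String)
    (hn : n ∈ cols)
    (hmin : ∀ x ∈ cols, pvR n ≤ pvR x)
    (huniq : ∀ x ∈ cols, pvR x = pvR n → x = n) :
    pick_metric_column_py_alt cols = some n := by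
  match cols with
  | [] => cases hn
  | c :: rest =>
    obtain ⟨_, h2, h3, h4⟩ := pv_fold_props rest c
    set p := rest.foldl pvAltStep (c, pvR c) with hp
    have hpmem : p.1 ∈ c :: rest := by
      rcases h2 with h | h <;> simp [h]
    have hle : pvR p.1 ≤ pvR n := by
      rcases List.mem_cons.mp hn with rfl | hn
      · exact h3
      · exact h4 n hn
    have hge : pvR n ≤ pvR p.1 := hmin p.1 hpmem
    have : p.1 = n := huniq p.1 hpmem (by omega)
    simp only [pick_metric_column_py_alt]
    exact congrArg some this
lemma pvR_lit0 : pvR "success_rate_percentage" = 0 := by rw [pvR_eq]; simp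
lemma pvR_lit1 : pvR "failed_rate_percentage" = 1 := by rw [pvR_eq]; simp
lemma pvR_lit2 : pvR "flagged_percentage" = 2 := by rw [pvR_eq]; simp
lemma pvR_lit3 : pvR "flagged_rate" = 3 := by rw [pvR_eq]; simp
lemma pvR_lit4 : pvR "failure_rate" = 4 := by rw [pvR_eq]; simp
lemma pvR_lit5 : pvR "failed_transactions" = 5 := by rw [pvR_eq]; simp
lemma pvR_lit6 : pvR "successful_transactions" = 6 := by rw [pvR_eq]; simp
lemma pvR_lit7 : pvR "total_transactions" = 7 := by rw [pvR_eq]; simp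
lemma pvR_lit8 : pvR "amount_inr" = 8 := by rw [pvR_eq]; simp

set_option maxHeartbeats 4000000 in
theorem pv_AB (cols : List String) : pick_metric_column_py cols = pick_metric_column_py_alt cols := by
  by_cases c0 : "success_rate_percentage" ∈ cols
  · rw [show pick_metric_column_py cols = some "success_rate_percentage" from by
      simp [pick_metric_column_py, pvPickLoop, pvPreferredOrder, c0]]
    symm
    apply pv_alt_of_min
    · exact c0
    · intro x hx
      have hr := pvR_lit0
      rw [hr, pvR_eq x]
      split_ifs with g0 g1 g2 g3 g4 g5 g6 g7 g8
      · omega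
      · omega
      · omega
      · omega
      · omega
      · omega
      · omega
      · omega
      · omega
      · omega
    · intro x hx hxr
      have hr := pvR_lit0
      rw [hr, pvR_eq x] at hxr
      split_ifs at hxr with g0 g1 g2 g3 g4 g5 g6 g7 g8
      · exact g0
      · omega
      · omega
      · omega
      · omega
      · omega
      · omega
      · omega
      · omega
      · omega
  by_cases c1 : "failed_rate_percentage" ∈ cols
  · rw [show pick_metric_column_py cols = some "failed_rate_percentage" from by
      simp [pick_metric_column_py, pvPickLoop, pvPreferredOrder, c0, c1]]
    symm
    apply pv_alt_of_min
    · exact c1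
    · intro x hx
      have hr := pvR_lit1
      rw [hr, pvR_eq x]
      split_ifs with g0 g1 g2 g3 g4 g5 g6 g7 g8
      · exact absurd (by rwa [g0] at hx) c0
      · omega
      · omega
      · omega
      · omega
      · omega
      · omega
      · omega
      · omega
      · omega
    · intro x hx hxr
      have hr := pvR_lit1
      rw [hr, pvR_eq x] at hxr
      split_ifs at hxr with g0 g1 g2 g3 g4 g5 g6 g7 g8
      · omega
      · exact g1
      · omega
      · omega
      · omega
      · omega
      · omega
      · omega
      · omega
      · omega
  by_cases c2 : "flagged_percentage" ∈ cols
  · rw [show pick_metric_column_py cols = some "flagged_percentage" from by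
      simp [pick_metric_column_py, pvPickLoop, pvPreferredOrder, c0, c1, c2]]
    symm
    apply pv_alt_of_min
    · exact c2
    · intro x hx
      have hr := pvR_lit2
      rw [hr, pvR_eq x]
      split_ifs with g0 g1 g2 g3 g4 g5 g6 g7 g8
      · exact absurd (by rwa [g0] at hx) c0
      · exact absurd (by rwa [g1] at hx) c1
      · omega
      · omega
      · omega
      · omega
      · omega
      · omega
      · omega
      · omega
    · intro x hx hxr
      have hr := pvR_lit2
      rw [hr, pvR_eq x] at hxr
      split_ifs at hxr with g0 g1 g2 g3 g4 g5 g6 g7 g8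
      · omega
      · omega
      · exact g2
      · omega
      · omega
      · omega
      · omega
      · omega
      · omega
      · omega
  by_cases c3 : "flagged_rate" ∈ cols
  · rw [show pick_metric_column_py cols = some "flagged_rate" from by
      simp [pick_metric_column_py, pvPickLoop, pvPreferredOrder, c0, c1, c2, c3]]
    symm
    apply pv_alt_of_min
    · exact c3
    · intro x hx
      have hr := pvR_lit3
      rw [hr, pvR_eq x]
      split_ifs with g0 g1 g2 g3 g4 g5 g6 g7 g8
      · exact absurd (by rwa [g0] at hx) c0
      · exact absurd (by rwa [g1] at hx) c1
      · exact absurd (by rwa [g2] at hx) c2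
      · omega
      · omega
      · omega
      · omega
      · omega
      · omega
      · omega
    · intro x hx hxr
      have hr := pvR_lit3
      rw [hr, pvR_eq x] at hxr
      split_ifs at hxr with g0 g1 g2 g3 g4 g5 g6 g7 g8
      · omega
      · omega
      · omega
      · exact g3
      · omega
      · omega
      · omega
      · omega
      · omega
      · omega
  by_cases c4 : "failure_rate" ∈ cols
  · rw [show pick_metric_column_py cols = some "failure_rate" from by
      simp [pick_metric_column_py, pvPickLoop, pvPreferredOrder, c0, c1, c2, c3, c4]]
    symm
    apply pv_alt_of_min
    · exact c4
    · intro x hx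
      have hr := pvR_lit4
      rw [hr, pvR_eq x]
      split_ifs with g0 g1 g2 g3 g4 g5 g6 g7 g8
      · exact absurd (by rwa [g0] at hx) c0
      · exact absurd (by rwa [g1] at hx) c1
      · exact absurd (by rwa [g2] at hx) c2
      · exact absurd (by rwa [g3] at hx) c3
      · omega
      · omega
      · omega
      · omega
      · omega
      · omega
    · intro x hx hxr
      have hr := pvR_lit4
      rw [hr, pvR_eq x] at hxr
      split_ifs at hxr with g0 g1 g2 g3 g4 g5 g6 g7 g8
      · omega
      · omega
      · omega
      · omega
      · exact g4
      · omega
      · omega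
      · omega
      · omega
      · omega
  by_cases c5 : "failed_transactions" ∈ cols
  · rw [show pick_metric_column_py cols = some "failed_transactions" from by
      simp [pick_metric_column_py, pvPickLoop, pvPreferredOrder, c0, c1, c2, c3, c4, c5]]
    symm
    apply pv_alt_of_min
    · exact c5
    · intro x hx
      have hr := pvR_lit5
      rw [hr, pvR_eq x]
      split_ifs with g0 g1 g2 g3 g4 g5 g6 g7 g8
      · exact absurd (by rwa [g0] at hx) c0
      · exact absurd (by rwa [g1] at hx) c1
      · exact absurd (by rwa [g2] at hx) c2
      · exact absurd (by rwa [g3] at hx) c3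
      · exact absurd (by rwa [g4] at hx) c4
      · omega
      · omega
      · omega
      · omega
      · omega
    · intro x hx hxr
      have hr := pvR_lit5
      rw [hr, pvR_eq x] at hxr
      split_ifs at hxr with g0 g1 g2 g3 g4 g5 g6 g7 g8
      · omega
      · omega
      · omega
      · omega
      · omega
      · exact g5
      · omega
      · omega
      · omega
      · omega
  by_cases c6 : "successful_transactions" ∈ cols
  · rw [show pick_metric_column_py cols = some "successful_transactions" from by
      simp [pick_metric_column_py, pvPickLoop, pvPreferredOrder, c0, c1, c2, c3, c4, c5, c6]]
    symm
    apply pv_alt_of_min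
    · exact c6
    · intro x hx
      have hr := pvR_lit6
      rw [hr, pvR_eq x]
      split_ifs with g0 g1 g2 g3 g4 g5 g6 g7 g8
      · exact absurd (by rwa [g0] at hx) c0
      · exact absurd (by rwa [g1] at hx) c1
      · exact absurd (by rwa [g2] at hx) c2
      · exact absurd (by rwa [g3] at hx) c3
      · exact absurd (by rwa [g4] at hx) c4
      · exact absurd (by rwa [g5] at hx) c5
      · omega
      · omega
      · omega
      · omega
    · intro x hx hxr
      have hr := pvR_lit6
      rw [hr, pvR_eq x] at hxr
      split_ifs at hxr with g0 g1 g2 g3 g4 g5 g6 g7 g8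
      · omega
      · omega
      · omega
      · omega
      · omega
      · omega
      · exact g6
      · omega
      · omega
      · omega
  by_cases c7 : "total_transactions" ∈ cols
  · rw [show pick_metric_column_py cols = some "total_transactions" from by
      simp [pick_metric_column_py, pvPickLoop, pvPreferredOrder, c0, c1, c2, c3, c4, c5, c6, c7]]
    symm
    apply pv_alt_of_min
    · exact c7
    · intro x hx
      have hr := pvR_lit7
      rw [hr, pvR_eq x]
      split_ifs with g0 g1 g2 g3 g4 g5 g6 g7 g8
      · exact absurd (by rwa [g0] at hx) c0
      · exact absurd (by rwa [g1] at hx) c1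
      · exact absurd (by rwa [g2] at hx) c2
      · exact absurd (by rwa [g3] at hx) c3
      · exact absurd (by rwa [g4] at hx) c4
      · exact absurd (by rwa [g5] at hx) c5
      · exact absurd (by rwa [g6] at hx) c6
      · omega
      · omega
      · omega
    · intro x hx hxr
      have hr := pvR_lit7
      rw [hr, pvR_eq x] at hxr
      split_ifs at hxr with g0 g1 g2 g3 g4 g5 g6 g7 g8
      · omega
      · omega
      · omega
      · omega
      · omega
      · omega
      · omega
      · exact g7
      · omega
      · omega
  by_cases c8 : "amount_inr" ∈ cols
  · rw [show pick_metric_column_py cols = some "amount_inr" from by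
      simp [pick_metric_column_py, pvPickLoop, pvPreferredOrder, c0, c1, c2, c3, c4, c5, c6, c7, c8]]
    symm
    apply pv_alt_of_min
    · exact c8
    · intro x hx
      have hr := pvR_lit8
      rw [hr, pvR_eq x]
      split_ifs with g0 g1 g2 g3 g4 g5 g6 g7 g8
      · exact absurd (by rwa [g0] at hx) c0
      · exact absurd (by rwa [g1] at hx) c1
      · exact absurd (by rwa [g2] at hx) c2
      · exact absurd (by rwa [g3] at hx) c3
      · exact absurd (by rwa [g4] at hx) c4
      · exact absurd (by rwa [g5] at hx) c5
      · exact absurd (by rwa [g6] at hx) c6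
      · exact absurd (by rwa [g7] at hx) c7
      · omega
      · omega
    · intro x hx hxr
      have hr := pvR_lit8
      rw [hr, pvR_eq x] at hxr
      split_ifs at hxr with g0 g1 g2 g3 g4 g5 g6 g7 g8
      · omega
      · omega
      · omega
      · omega
      · omega
      · omega
      · omega
      · omega
      · exact g8
      · omega
  rcases cols with _ | ⟨c, rest⟩
  · decide
  · have hall : ∀ x, x ∈ c :: rest → pvR x = 9 := by
      intro x hx
      rw [pvR_eq x]
      split_ifs with g0 g1 g2 g3 g4 g5 g6 g7 g8
      · exact absurd (by rwa [g0] at hx) c0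
      · exact absurd (by rwa [g1] at hx) c1
      · exact absurd (by rwa [g2] at hx) c2
      · exact absurd (by rwa [g3] at hx) c3
      · exact absurd (by rwa [g4] at hx) c4
      · exact absurd (by rwa [g5] at hx) c5
      · exact absurd (by rwa [g6] at hx) c6
      · exact absurd (by rwa [g7] at hx) c7
      · exact absurd (by rwa [g8] at hx) c8
      · rfl
    have hstay := pv_fold_stay rest c (fun x hx => by
      have h1 := hall x (by simp [hx]); have h2 := hall c (by simp); omega)
    rw [show pick_metric_column_py (c :: rest) = some c from by
      simp [pick_metric_column_py, pvPickLoop, pvPreferredOrder, c0, c1, c2, c3, c4, c5, c6, c7, c8]]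
    show some c = some ((rest.foldl pvAltStep (c, pvR c)).1)
    rw [hstay]

-- ===== VERDICT (by name: the statement is the Claim_ definition above) =====
theorem pick_metric_column_py_spec : Claim_equal_pick_metric_column_py := by
  intro numeric_cols _
  unfold Spec_pick_metric_column_py
  exact pv_AB numeric_cols
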